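-- pv_equiv track=rewrite | github.com/Taller-Abierto-de-Humanidades-Digitales/python_humanidades | estudiantes/Julian Felipe Benavides Nieves/ActIntermedia/formato.py | formatobusqueda
-- ===== SOURCE A (Python) =====
-- def formatobusqueda(biblioteca:list, resultadobusqueda:list)->list:
--     formatoresultados = []
--     for indice in resultadobusqueda:
--         referencia = ''
--         for clave, valor in biblioteca[indice].items():
--             if clave == 'id':
--                 referencia += f'{clave}: {valor}\n'
--             elif clave == 'title':
--                 referencia += f'{clave}: {valor}\n'
--         for clave, valor in biblioteca[indice].items():
--             if clave != 'title' and clave != 'id':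
--                 referencia += f'{clave}: {valor}\n'
--         formatoresultados.append(referencia)
--     return formatoresultados
-- ===== SOURCE B (Python) =====
-- def formatobusqueda(biblioteca: list, resultadobusqueda: list) -> list:
--     formatoresultados = []
--     for indice in resultadobusqueda:
--         cabeza = ''
--         cola = ''
--         for clave, valor in biblioteca[indice].items():
--             linea = f'{clave}: {valor}\n'
--             if clave == 'id' or clave == 'title':
--                 cabeza += linea
--             else:
--                 cola += linea
--         formatoresultados.append(cabeza + cola)
--     return formatoresultados
-- ===== Notes on version B (the rewrite author's own statement) =====
-- stated objective: simpler
-- what changed: B iterates each entry's items once, accumulating the id/title lines and the remaining lines in two separate accumulators and joining them, instead of A's two full filtered scans over the same dict.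
import Mathlib
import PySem

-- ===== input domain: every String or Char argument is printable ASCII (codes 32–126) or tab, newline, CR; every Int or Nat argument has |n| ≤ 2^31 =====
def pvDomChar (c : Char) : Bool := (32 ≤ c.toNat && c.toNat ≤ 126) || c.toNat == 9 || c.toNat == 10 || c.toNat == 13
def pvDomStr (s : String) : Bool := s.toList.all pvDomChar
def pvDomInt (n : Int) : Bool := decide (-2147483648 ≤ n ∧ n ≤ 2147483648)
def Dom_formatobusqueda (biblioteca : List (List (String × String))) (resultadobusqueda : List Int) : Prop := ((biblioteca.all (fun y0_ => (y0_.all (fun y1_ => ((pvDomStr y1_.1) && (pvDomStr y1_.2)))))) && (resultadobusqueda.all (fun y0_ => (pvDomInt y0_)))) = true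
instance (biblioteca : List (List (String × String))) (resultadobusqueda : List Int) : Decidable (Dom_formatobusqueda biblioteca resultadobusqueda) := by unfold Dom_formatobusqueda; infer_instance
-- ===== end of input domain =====

-- B replaces A's two filtered scans per entry by one pass with two accumulators; objective: simpler.

-- ===== PORT A =====
-- A's first loop over the dict's items (keeps only 'id'/'title' lines, in A's branch order)
def pvA_loop1 (entry : List (String × String)) (referencia : String) : String :=
  entry.foldl (fun s kv =>
    if kv.1 == "id" then s ++ (kv.1 ++ ": " ++ kv.2 ++ "\n")
    else if kv.1 == "title" then s ++ (kv.1 ++ ": " ++ kv.2 ++ "\n")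
    else s) referencia

-- A's second loop over the same items (keeps all other lines)
def pvA_loop2 (entry : List (String × String)) (referencia : String) : String :=
  entry.foldl (fun s kv =>
    if kv.1 != "title" && kv.1 != "id" then s ++ (kv.1 ++ ": " ++ kv.2 ++ "\n")
    else s) referencia

def formatobusqueda (biblioteca : List (List (String × String))) (resultadobusqueda : List Int) : List String :=
  resultadobusqueda.foldl (fun formatoresultados indice =>
    let entry := (PySem.List.pyGet? biblioteca indice).getD []   -- biblioteca[indice]; none (IndexError) excluded by Pre_
    formatoresultados ++ [pvA_loop2 entry (pvA_loop1 entry "")]) []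

-- ===== PORT B =====
-- B's single loop: state (cabeza, cola)
def pvB_loop (entry : List (String × String)) (st : String × String) : String × String :=
  entry.foldl (fun st kv =>
    let linea := kv.1 ++ ": " ++ kv.2 ++ "\n"
    if kv.1 == "id" || kv.1 == "title" then (st.1 ++ linea, st.2)
    else (st.1, st.2 ++ linea)) st

def formatobusqueda_alt (biblioteca : List (List (String × String))) (resultadobusqueda : List Int) : List String :=
  resultadobusqueda.foldl (fun formatoresultados indice =>
    let entry := (PySem.List.pyGet? biblioteca indice).getD []   -- biblioteca[indice]; none (IndexError) excluded by Pre_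
    let p := pvB_loop entry ("", "")
    formatoresultados ++ [p.1 ++ p.2]) []

-- ===== PRECONDITION & SPEC =====
-- Pre_ excludes exactly the inputs where Python's biblioteca[indice] raises IndexError
def Pre_formatobusqueda (biblioteca : List (List (String × String))) (resultadobusqueda : List Int) : Prop :=
  ∀ i ∈ resultadobusqueda, PySem.Raise.InRange biblioteca.length i
instance (biblioteca : List (List (String × String))) (resultadobusqueda : List Int) : Decidable (Pre_formatobusqueda biblioteca resultadobusqueda) := by unfold Pre_formatobusqueda; infer_instance
def pvWitness_formatobusqueda : (List (List (String × String))) × List Int :=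
  ([[("id", "1"), ("author", "x")], [("title", "t")]], [0, 1, -1])

def Spec_formatobusqueda (biblioteca : List (List (String × String))) (resultadobusqueda : List Int) (out : List String) : Prop := out = formatobusqueda_alt biblioteca resultadobusqueda
instance (biblioteca : List (List (String × String))) (resultadobusqueda : List Int) (out : List String) : Decidable (Spec_formatobusqueda biblioteca resultadobusqueda out) := by unfold Spec_formatobusqueda; infer_instance

-- ===== CLAIM (what is proved, stated in full; the proofs are below) =====
def Claim_equal_formatobusqueda : Prop := ∀ (biblioteca : List (List (String × String))) (resultadobusqueda : List Int), Dom_formatobusqueda biblioteca resultadobusqueda → Pre_formatobusqueda biblioteca resultadobusqueda → Spec_formatobusqueda biblioteca resultadobusqueda (formatobusqueda biblioteca resultadobusqueda)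

-- ===== LEMMAS AND PROOFS =====
theorem pvB_loop_split (entry : List (String × String)) (f l : String) :
    pvB_loop entry (f, l) = (pvA_loop1 entry f, pvA_loop2 entry l) := by
  induction entry generalizing f l with
  | nil => rfl
  | cons kv t ih =>
    simp only [pvB_loop, pvA_loop1, pvA_loop2, List.foldl] at ih ⊢
    cases h1 : kv.1 == "id" <;> cases h2 : kv.1 == "title" <;>
      simp only [h1, h2, bne, Bool.or_true, Bool.or_false, Bool.not_true,
        Bool.not_false, Bool.and_true, Bool.and_false, reduceIte] <;>
      exact ih _ _

theorem pvA_loop2_append (entry : List (String × String)) (a : String) :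
    pvA_loop2 entry a = a ++ pvA_loop2 entry "" := by
  induction entry generalizing a with
  | nil => simp [pvA_loop2]
  | cons kv t ih =>
    simp only [pvA_loop2, List.foldl] at ih ⊢
    by_cases h : (kv.1 != "title" && kv.1 != "id") = true
    · rw [if_pos h, if_pos h]
      conv_lhs => rw [ih]
      conv_rhs => rw [ih]
      simp [String.append_assoc]
    · rw [if_neg h, if_neg h]
      exact ih a

theorem pv_entry_eq (entry : List (String × String)) :
    pvA_loop2 entry (pvA_loop1 entry "") =
      (pvB_loop entry ("", "")).1 ++ (pvB_loop entry ("", "")).2 := by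
  rw [pvB_loop_split]
  exact pvA_loop2_append entry _

-- ===== VERDICT (by name: the statement is the Claim_ definition above) =====
theorem formatobusqueda_spec : Claim_equal_formatobusqueda := by
  intro biblioteca resultadobusqueda _ _
  unfold Spec_formatobusqueda formatobusqueda formatobusqueda_alt
  induction resultadobusqueda using List.reverseRecOn with
  | nil => rfl
  | append_singleton t i ih => simp [List.foldl_append, pv_entry_eq]
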